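-- pv_equiv track=rewrite | github.com/Canbomm/UNB | 1 Semestre/Questionários/Questionário 08/Questão 10/testandoFuncao.py | contaespaco
-- ===== SOURCE A (Python) =====
-- def contaespaco(lista):
--     conta = 0
--     resposta = 0
--     if lista[0] == 0:
--         for i in lista:
--             if i == 1:
--                 break
--             resposta += 2
--     for i in lista:
--         if i == 1:
--             if resposta < conta:
--                 resposta = conta
--             conta = 0
--         else:
--             conta += 1
--     # tratando a resposta
--     if resposta % 2 == 0:
--         resposta = resposta/2
--     else:
--         resposta = (resposta + 1)/2
--     return int(resposta)
-- ===== SOURCE B (Python) =====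
-- def contaespaco(lista):
--     # indices of the 1s; terminated non-one runs are exactly the gaps
--     # between consecutive 1s (and before the first 1)
--     ones = [i for i, x in enumerate(lista) if x == 1]
--     lead = ones[0] if ones else len(lista)
--     best = 2 * lead if lista[0] == 0 else 0
--     prev = -1
--     for i in ones:
--         best = max(best, i - prev - 1)
--         prev = i
--     return (best + 1) // 2
-- ===== Notes on version B (the rewrite author's own statement) =====
-- stated objective: alternative
-- what changed: B replaces A's two stateful scans (a leading-run doubling loop plus a run counter reset on each 1) by computing the list of indices of 1s once and folding over the gaps between consecutive 1s, with a single unconditional (best+1)//2 at the end.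
import Mathlib
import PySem

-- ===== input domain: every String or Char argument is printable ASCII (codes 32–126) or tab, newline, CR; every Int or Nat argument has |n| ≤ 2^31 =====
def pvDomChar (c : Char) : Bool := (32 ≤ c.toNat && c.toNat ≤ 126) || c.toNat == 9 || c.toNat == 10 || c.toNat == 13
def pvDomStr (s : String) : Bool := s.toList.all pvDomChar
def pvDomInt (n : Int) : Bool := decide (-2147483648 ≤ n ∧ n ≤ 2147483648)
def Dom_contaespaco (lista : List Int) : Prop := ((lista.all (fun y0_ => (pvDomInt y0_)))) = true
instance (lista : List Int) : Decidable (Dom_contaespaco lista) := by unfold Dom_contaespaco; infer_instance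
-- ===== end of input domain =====

-- B replaces A's two stateful scans (leading-run doubling loop and run counter with reset)
-- by listing the indices of the 1s once and folding over the gaps between consecutive 1s;
-- objective: alternative decomposition, same O(n) cost.

-- ===== PORT A =====
-- 'for i in lista: if i == 1: break; resposta += 2'
def contaespacoLead : List Int → Int
  | [] => 0
  | i :: rest => if i = 1 then 0 else 2 + contaespacoLead rest

-- the main loop, state (conta, resposta)
def contaespacoLoop : List Int → Int → Int → Int × Int
  | [], conta, resposta => (conta, resposta)
  | i :: rest, conta, resposta =>
    if i = 1 then contaespacoLoop rest 0 (if resposta < conta then conta else resposta)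
    else contaespacoLoop rest (conta + 1) resposta

-- initial resposta: 2 * leading non-1 run if lista[0] == 0
def contaespacoResposta0 (lista : List Int) : Int :=
  match PySem.List.pyGet? lista 0 with
  | some v => if v = 0 then contaespacoLead lista else 0
  | none => 0      -- indexing the first element raises IndexError on the empty list; excluded by Pre_

def contaespaco (lista : List Int) : Int :=
  if PySem.Int.mod ((contaespacoLoop lista 0 (contaespacoResposta0 lista)).2) 2 = 0
  then PySem.Int.floordiv ((contaespacoLoop lista 0 (contaespacoResposta0 lista)).2) 2
  else PySem.Int.floordiv ((contaespacoLoop lista 0 (contaespacoResposta0 lista)).2 + 1) 2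

-- ===== PORT B =====
-- ones = [i for i, x in enumerate(lista) if x == 1]
def altOnes (lista : List Int) : List Int :=
  ((PySem.List.enumerate lista 0).filter (fun p => p.2 == 1)).map (fun p => p.1)

-- lead = first index of a 1, else len(lista)
def altLead (lista : List Int) : Int :=
  match (altOnes lista).head? with | some i => i | none => (lista.length : Int)

-- best = 2 * lead if the first element is 0, else 0
def altBest0 (lista : List Int) : Int :=
  match PySem.List.pyGet? lista 0 with
  | some v => if v = 0 then 2 * altLead lista else 0
  | none => 0      -- indexing the first element raises IndexError on the empty list; excluded by Pre_

def contaespaco_alt (lista : List Int) : Int :=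
  PySem.Int.floordiv
    (((altOnes lista).foldl (fun (s : Int × Int) i => (max s.1 (i - s.2 - 1), i)) (altBest0 lista, -1)).1 + 1) 2

-- ===== PRECONDITION & SPEC =====
-- A indexes the first element, which raises IndexError on the empty list.
def Pre_contaespaco (lista : List Int) : Prop := lista ≠ []
instance (lista : List Int) : Decidable (Pre_contaespaco lista) := by unfold Pre_contaespaco; infer_instance
def pvWitness_contaespaco : List Int := [0, 2, 1, 3]

def Spec_contaespaco (lista : List Int) (out : Int) : Prop := out = contaespaco_alt lista
instance (lista : List Int) (out : Int) : Decidable (Spec_contaespaco lista out) := by unfold Spec_contaespaco; infer_instance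

-- ===== CLAIM (what is proved, stated in full; the proofs are below) =====
def Claim_equal_contaespaco : Prop := ∀ (lista : List Int), Dom_contaespaco lista → Pre_contaespaco lista → Spec_contaespaco lista (contaespaco lista)

-- ===== LEMMAS AND PROOFS =====
def onesFrom (s : Int) (xs : List Int) : List Int :=
  ((PySem.List.enumerate xs s).filter (fun p => p.2 == 1)).map (fun p => p.1)

theorem onesFrom_nil (s : Int) : onesFrom s [] = [] := rfl

theorem onesFrom_cons (s x : Int) (xs : List Int) :
    onesFrom s (x :: xs) = if x = 1 then s :: onesFrom (s+1) xs else onesFrom (s+1) xs := by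
  simp [onesFrom, PySem.List.enumerate_cons, List.filter_cons]
  by_cases h : x = 1 <;> simp [h]

theorem loop_eq_gap (xs : List Int) : ∀ (s c r : Int),
    (contaespacoLoop xs c r).2 =
    (List.foldl (fun (t : Int × Int) i => (max t.1 (i - t.2 - 1), i)) (r, s - 1 - c) (onesFrom s xs)).1 := by
  induction xs with
  | nil => intro s c r; simp [contaespacoLoop, onesFrom_nil]
  | cons x xs ih =>
    intro s c r
    by_cases h : x = 1
    · simp only [contaespacoLoop, h, if_pos, onesFrom_cons, List.foldl_cons]
      have h1 : max r (s - (s - 1 - c) - 1) = if r < c then c else r := by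
        rw [max_def]; split_ifs <;> omega
      rw [h1]
      have hih := ih (s+1) 0 (if r < c then c else r)
      have h2 : (s + 1 : Int) - 1 - 0 = s := by omega
      rw [h2] at hih
      exact hih
    · simp only [contaespacoLoop, h, if_false, onesFrom_cons]
      have hih := ih (s+1) (c+1) r
      have h2 : (s + 1 : Int) - 1 - (c + 1) = s - 1 - c := by omega
      rw [h2] at hih
      exact hih

theorem lead_eq (xs : List Int) : ∀ (s : Int),
    contaespacoLead xs = 2 * ((onesFrom s xs).head?.getD (s + xs.length) - s) := by
  induction xs with
  | nil => intro s; simp [contaespacoLead, onesFrom_nil]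
  | cons x xs ih =>
    intro s
    by_cases h : x = 1
    · simp [contaespacoLead, h, onesFrom_cons]
    · simp only [contaespacoLead, h, if_false, onesFrom_cons, List.length_cons]
      rw [ih (s+1)]
      have hc : (s : Int) + ((xs.length + 1 : Nat) : Int) = (s + 1) + ↑xs.length := by push_cast; ring
      rw [hc]
      omega

theorem half_eq (r : Int) (h : PySem.Int.mod r 2 = 0) :
    PySem.Int.floordiv r 2 = PySem.Int.floordiv (r + 1) 2 := by
  rw [PySem.Int.floordiv_eq_ediv_of_pos (by omega), PySem.Int.floordiv_eq_ediv_of_pos (by omega)]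
  rw [PySem.Int.mod_eq_emod_of_pos (by omega)] at h
  omega

-- ===== VERDICT (by name: the statement is the Claim_ definition above) =====
theorem best0_eq (lista : List Int) :
    altBest0 lista = contaespacoResposta0 lista := by
  unfold altBest0 contaespacoResposta0
  cases PySem.List.pyGet? lista 0 with
  | none => rfl
  | some v =>
    simp only []
    have hl : contaespacoLead lista = 2 * ((onesFrom 0 lista).head?.getD (0 + ↑lista.length) - 0) :=
      lead_eq lista 0
    have hh : altLead lista = (onesFrom 0 lista).head?.getD (0 + ↑lista.length) := by
      unfold altLead
      have : altOnes lista = onesFrom 0 lista := rfl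
      rw [this]
      cases (onesFrom 0 lista).head? <;> simp
    rw [hl, hh]
    ring_nf

theorem contaespaco_spec : Claim_equal_contaespaco := by
  intro lista _ _
  unfold Spec_contaespaco contaespaco contaespaco_alt
  have hones : altOnes lista = onesFrom 0 lista := rfl
  have hloop := loop_eq_gap lista 0 0 (contaespacoResposta0 lista)
  have hst : (0:Int) - 1 - 0 = -1 := by omega
  rw [hst] at hloop
  rw [hones, best0_eq, hloop]
  set g : Int := (List.foldl (fun (t : Int × Int) i => (max t.1 (i - t.2 - 1), i))
      (contaespacoResposta0 lista, -1) (onesFrom 0 lista)).1 with hg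
  by_cases hpar : PySem.Int.mod g 2 = 0
  · rw [if_pos hpar, half_eq g hpar]
  · rw [if_neg hpar]
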